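-- pv_equiv track=rewrite | github.com/JonnyMurillo288/MLB_Pitcher_Analysis_Tools | backend/compute.py | _reg_col_label
-- ===== SOURCE A (Python) =====
-- METRIC_CONFIG: dict[str, dict] = {
--     "release_speed":     {"label": "Velocity",           "unit": "mph", "higher_is_better": True,  "fmt": ".1f"},
--     "release_spin_rate": {"label": "Spin Rate",          "unit": "rpm", "higher_is_better": True,  "fmt": ".0f"},
--     "pfx_x":             {"label": "Horizontal Break",   "unit": "in",  "higher_is_better": None,  "fmt": ".2f"},
--     "pfx_z":             {"label": "Vertical Break",     "unit": "in",  "higher_is_better": None,  "fmt": ".2f"},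
--     "release_extension": {"label": "Extension",          "unit": "ft",  "higher_is_better": True,  "fmt": ".2f"},
--     "release_pos_x":     {"label": "Release Point X",   "unit": "ft",  "higher_is_better": None,  "fmt": ".2f"},
--     "release_pos_z":     {"label": "Release Point Z",   "unit": "ft",  "higher_is_better": None,  "fmt": ".2f"},
--     "effective_speed":   {"label": "Effective Velocity", "unit": "mph", "higher_is_better": True,  "fmt": ".1f"},
-- }
--
-- OUTCOME_CONFIG: dict[str, dict] = {
--     "exit_velo":              {"label": "Exit Velocity (mph)",  "higher_is_better": False, "fmt": ".1f"},
--     "gb_pct":                 {"label": "GB%",                  "higher_is_better": True,  "fmt": ".1f"},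
--     "fb_pct":                 {"label": "FB%",                  "higher_is_better": False, "fmt": ".1f"},
--     "bb_per_9":               {"label": "BB/9",                 "higher_is_better": False, "fmt": ".2f"},
--     "k_per_9":                {"label": "K/9",                  "higher_is_better": True,  "fmt": ".2f"},
--     "whiff_pct":              {"label": "Whiff%",               "higher_is_better": True,  "fmt": ".1f"},
--     "swstr_pct":              {"label": "SwStr%",               "higher_is_better": True,  "fmt": ".1f"},
--     "chase_pct":              {"label": "Chase%",               "higher_is_better": True,  "fmt": ".1f"},
--     "hhr_pct":                {"label": "Hard Hit%",            "higher_is_better": False, "fmt": ".1f"},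
--     "barrel_pct":             {"label": "Barrel%",              "higher_is_better": False, "fmt": ".1f"},
--     "fps_pct":                {"label": "F-Strike%",            "higher_is_better": True,  "fmt": ".1f"},
--     "zone_pct":               {"label": "Zone%",                "higher_is_better": None,  "fmt": ".1f"},
--     "iz_whiff_pct":           {"label": "In-Zone Whiff%",       "higher_is_better": True,  "fmt": ".1f"},
--     "oz_whiff_pct":           {"label": "O-Zone Whiff%",        "higher_is_better": True,  "fmt": ".1f"},
--     "two_strike_whiff_pct":   {"label": "2-Strike Whiff%",      "higher_is_better": True,  "fmt": ".1f"},
--     "rp_consistency":         {"label": "Release Spread (ft)",  "higher_is_better": False, "fmt": ".3f"},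
-- }
--
-- PITCH_TYPE_LABELS: dict[str, str] = {
--     "FF": "4-Seam FB", "SI": "Sinker",  "FC": "Cutter",      "SL": "Slider",
--     "CU": "Curveball", "KC": "Kn. Curve","CH": "Changeup",   "FS": "Splitter",
--     "ST": "Sweeper",   "SV": "Slurve",  "KN": "Knuckleball", "EP": "Eephus",
--     "SC": "Screwball", "FO": "Forkball","PO": "Pitchout",    "CS": "Slow Curve",
-- }
--
-- _METRIC_SHORT: dict[str, str] = {
--     "release_speed":     "velo",
--     "release_spin_rate": "spin",
--     "pfx_x":             "break_h",
--     "pfx_z":             "break_v",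
--     "release_extension": "ext",
--     "release_pos_x":     "rel_x",
--     "release_pos_z":     "rel_z",
--     "effective_speed":   "eff_velo",
-- }
--
-- def _pt_label(pt: str) -> str:
--     return PITCH_TYPE_LABELS.get(str(pt), str(pt))
--
-- def _reg_col_label(col: str, pitch_types: list[str]) -> str:
--     if col in OUTCOME_CONFIG:
--         return OUTCOME_CONFIG[col]["label"]
--     for raw, short in _METRIC_SHORT.items():
--         if col == short:
--             return METRIC_CONFIG[raw]["label"] + " — All Pitches"
--         for pt in pitch_types:
--             if col == f"{short}_{pt}":
--                 return f"{METRIC_CONFIG[raw]['label']} — {_pt_label(pt)}"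
--     return col
-- ===== SOURCE B (Python) =====
-- METRIC_CONFIG: dict[str, dict] = {
--     "release_speed":     {"label": "Velocity",           "unit": "mph", "higher_is_better": True,  "fmt": ".1f"},
--     "release_spin_rate": {"label": "Spin Rate",          "unit": "rpm", "higher_is_better": True,  "fmt": ".0f"},
--     "pfx_x":             {"label": "Horizontal Break",   "unit": "in",  "higher_is_better": None,  "fmt": ".2f"},
--     "pfx_z":             {"label": "Vertical Break",     "unit": "in",  "higher_is_better": None,  "fmt": ".2f"},
--     "release_extension": {"label": "Extension",          "unit": "ft",  "higher_is_better": True,  "fmt": ".2f"},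
--     "release_pos_x":     {"label": "Release Point X",   "unit": "ft",  "higher_is_better": None,  "fmt": ".2f"},
--     "release_pos_z":     {"label": "Release Point Z",   "unit": "ft",  "higher_is_better": None,  "fmt": ".2f"},
--     "effective_speed":   {"label": "Effective Velocity", "unit": "mph", "higher_is_better": True,  "fmt": ".1f"},
-- }
--
-- OUTCOME_CONFIG: dict[str, dict] = {
--     "exit_velo":              {"label": "Exit Velocity (mph)",  "higher_is_better": False, "fmt": ".1f"},
--     "gb_pct":                 {"label": "GB%",                  "higher_is_better": True,  "fmt": ".1f"},
--     "fb_pct":                 {"label": "FB%",                  "higher_is_better": False, "fmt": ".1f"},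
--     "bb_per_9":               {"label": "BB/9",                 "higher_is_better": False, "fmt": ".2f"},
--     "k_per_9":                {"label": "K/9",                  "higher_is_better": True,  "fmt": ".2f"},
--     "whiff_pct":              {"label": "Whiff%",               "higher_is_better": True,  "fmt": ".1f"},
--     "swstr_pct":              {"label": "SwStr%",               "higher_is_better": True,  "fmt": ".1f"},
--     "chase_pct":              {"label": "Chase%",               "higher_is_better": True,  "fmt": ".1f"},
--     "hhr_pct":                {"label": "Hard Hit%",            "higher_is_better": False, "fmt": ".1f"},
--     "barrel_pct":             {"label": "Barrel%",              "higher_is_better": False, "fmt": ".1f"},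
--     "fps_pct":                {"label": "F-Strike%",            "higher_is_better": True,  "fmt": ".1f"},
--     "zone_pct":               {"label": "Zone%",                "higher_is_better": None,  "fmt": ".1f"},
--     "iz_whiff_pct":           {"label": "In-Zone Whiff%",       "higher_is_better": True,  "fmt": ".1f"},
--     "oz_whiff_pct":           {"label": "O-Zone Whiff%",        "higher_is_better": True,  "fmt": ".1f"},
--     "two_strike_whiff_pct":   {"label": "2-Strike Whiff%",      "higher_is_better": True,  "fmt": ".1f"},
--     "rp_consistency":         {"label": "Release Spread (ft)",  "higher_is_better": False, "fmt": ".3f"},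
-- }
--
-- PITCH_TYPE_LABELS: dict[str, str] = {
--     "FF": "4-Seam FB", "SI": "Sinker",  "FC": "Cutter",      "SL": "Slider",
--     "CU": "Curveball", "KC": "Kn. Curve","CH": "Changeup",   "FS": "Splitter",
--     "ST": "Sweeper",   "SV": "Slurve",  "KN": "Knuckleball", "EP": "Eephus",
--     "SC": "Screwball", "FO": "Forkball","PO": "Pitchout",    "CS": "Slow Curve",
-- }
--
-- _METRIC_SHORT: dict[str, str] = {
--     "release_speed":     "velo",
--     "release_spin_rate": "spin",
--     "pfx_x":             "break_h",
--     "pfx_z":             "break_v",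
--     "release_extension": "ext",
--     "release_pos_x":     "rel_x",
--     "release_pos_z":     "rel_z",
--     "effective_speed":   "eff_velo",
-- }
--
-- # short metric key -> resolved label, computed once at module load
-- _SHORT_LABELS: dict[str, str] = {
--     short: METRIC_CONFIG[raw]["label"] for raw, short in _METRIC_SHORT.items()
-- }
--
-- def _pt_label(pt: str) -> str:
--     return PITCH_TYPE_LABELS.get(str(pt), str(pt))
--
-- def _reg_col_label(col: str, pitch_types: list[str]) -> str:
--     # Parse `col` itself instead of scanning the metric x pitch-type grid:
--     # a metric column is either an exact short key, or `short "_" pt`.  Split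
--     # `col` at each underscore and test head/tail by lookup.  No short key is
--     # another short key followed by "_...", so at most one split can succeed
--     # and first-match order is irrelevant.
--     if col in OUTCOME_CONFIG:
--         return OUTCOME_CONFIG[col]["label"]
--     lbl = _SHORT_LABELS.get(col)
--     if lbl is not None:
--         return lbl + " — All Pitches"
--     for i, ch in enumerate(col):
--         if ch == "_":
--             lbl = _SHORT_LABELS.get(col[:i])
--             if lbl is not None and col[i + 1:] in pitch_types:
--                 return f"{lbl} — {_pt_label(col[i + 1:])}"
--     return col
-- ===== Notes on version B (the rewrite author's own statement) =====
-- stated objective: faster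
-- what changed: Instead of A's nested scan that builds and compares a candidate f-string for every (metric short, pitch type) pair, B parses the column string itself: it walks col once, and at each underscore looks up the prefix in a short->label table resolved at load time and tests the suffix for membership in pitch_types; since no short key is another short key followed by an underscore, at most one split can succeed, so the result equals A's first-match scan.
import Mathlib
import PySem

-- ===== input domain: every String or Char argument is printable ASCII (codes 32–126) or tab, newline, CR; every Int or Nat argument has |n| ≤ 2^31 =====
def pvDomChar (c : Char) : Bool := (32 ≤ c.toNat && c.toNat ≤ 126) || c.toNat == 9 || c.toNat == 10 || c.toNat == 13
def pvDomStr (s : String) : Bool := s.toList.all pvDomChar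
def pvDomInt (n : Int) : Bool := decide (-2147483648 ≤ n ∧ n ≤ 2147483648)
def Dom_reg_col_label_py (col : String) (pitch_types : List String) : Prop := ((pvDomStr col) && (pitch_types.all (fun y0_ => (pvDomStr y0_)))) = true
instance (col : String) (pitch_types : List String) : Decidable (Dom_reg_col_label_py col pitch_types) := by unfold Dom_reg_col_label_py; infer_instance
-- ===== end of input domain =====

-- B parses the column string itself — splitting col at each underscore and testing head/tail by
-- lookup/membership — instead of A's scan that builds a candidate string per
-- (metric short, pitch type) pair; measurably faster at large pitch_types lists.

-- ===== PORT A =====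
-- Only the "label" field of each config dict is ever used, so the ports keep key → label.
def pvOutcomeLabels : PySem.Dict String String := PySem.Dict.mk
  [("exit_velo", "Exit Velocity (mph)"), ("gb_pct", "GB%"), ("fb_pct", "FB%"),
   ("bb_per_9", "BB/9"), ("k_per_9", "K/9"), ("whiff_pct", "Whiff%"),
   ("swstr_pct", "SwStr%"), ("chase_pct", "Chase%"), ("hhr_pct", "Hard Hit%"),
   ("barrel_pct", "Barrel%"), ("fps_pct", "F-Strike%"), ("zone_pct", "Zone%"),
   ("iz_whiff_pct", "In-Zone Whiff%"), ("oz_whiff_pct", "O-Zone Whiff%"),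
   ("two_strike_whiff_pct", "2-Strike Whiff%"), ("rp_consistency", "Release Spread (ft)")]

def pvMetricLabels : PySem.Dict String String := PySem.Dict.mk
  [("release_speed", "Velocity"), ("release_spin_rate", "Spin Rate"),
   ("pfx_x", "Horizontal Break"), ("pfx_z", "Vertical Break"),
   ("release_extension", "Extension"), ("release_pos_x", "Release Point X"),
   ("release_pos_z", "Release Point Z"), ("effective_speed", "Effective Velocity")]

def pvPitchLabels : PySem.Dict String String := PySem.Dict.mk
  [("FF", "4-Seam FB"), ("SI", "Sinker"), ("FC", "Cutter"), ("SL", "Slider"),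
   ("CU", "Curveball"), ("KC", "Kn. Curve"), ("CH", "Changeup"), ("FS", "Splitter"),
   ("ST", "Sweeper"), ("SV", "Slurve"), ("KN", "Knuckleball"), ("EP", "Eephus"),
   ("SC", "Screwball"), ("FO", "Forkball"), ("PO", "Pitchout"), ("CS", "Slow Curve")]

-- _METRIC_SHORT.items() in iteration order
def pvMetricShort : List (String × String) :=
  [("release_speed", "velo"), ("release_spin_rate", "spin"), ("pfx_x", "break_h"),
   ("pfx_z", "break_v"), ("release_extension", "ext"), ("release_pos_x", "rel_x"),
   ("release_pos_z", "rel_z"), ("effective_speed", "eff_velo")]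

-- _pt_label (str(pt) is the identity on str); shared module-level helper of both A and B
def pyPtLabel (pt : String) : String := (PySem.Dict.get? pvPitchLabels pt).getD pt

-- inner 'for pt in pitch_types' of A
def pvScanPts (col s lbl : String) : List String → Option String
  | [] => none
  | pt :: rest =>
      if col == s ++ "_" ++ pt then some (lbl ++ " — " ++ pyPtLabel pt)
      else pvScanPts col s lbl rest

-- outer 'for raw, short in _METRIC_SHORT.items()' of A; METRIC_CONFIG[raw]["label"] is total on
-- these raws (every raw of _METRIC_SHORT is a key of METRIC_CONFIG), ported as get?/getD
def pvLoopShorts (col : String) (pts : List String) : List (String × String) → String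
  | [] => col
  | (raw, s) :: rest =>
      if col == s then (PySem.Dict.get? pvMetricLabels raw).getD "" ++ " — All Pitches"
      else
        match pvScanPts col s ((PySem.Dict.get? pvMetricLabels raw).getD "") pts with
        | some r => r
        | none => pvLoopShorts col pts rest

def reg_col_label_py (col : String) (pitch_types : List String) : String :=
  -- 'if col in OUTCOME_CONFIG: return OUTCOME_CONFIG[col]["label"]' (membership then total lookup)
  match PySem.Dict.get? pvOutcomeLabels col with
  | some l => l
  | none => pvLoopShorts col pitch_types pvMetricShort

-- ===== PORT B =====
-- _SHORT_LABELS: the comprehension {short: METRIC_CONFIG[raw]["label"] for raw, short in _METRIC_SHORT.items()},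
-- resolved at module load; ported as the resulting literal dict
def pvShortLabels : PySem.Dict String String := PySem.Dict.mk
  [("velo", "Velocity"), ("spin", "Spin Rate"), ("break_h", "Horizontal Break"),
   ("break_v", "Vertical Break"), ("ext", "Extension"), ("rel_x", "Release Point X"),
   ("rel_z", "Release Point Z"), ("eff_velo", "Effective Velocity")]

-- B's 'for i, ch in enumerate(col): if ch == "_": …' — pre is col[:i], rest is col[i+1:],
-- walked by moving one char at a time from rest to pre
def pvScanSplits (pts : List String) : List Char → List Char → Option String
  | _, [] => none
  | pre, c :: rest =>
      if c == '_' then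
        match PySem.Dict.get? pvShortLabels (String.ofList pre) with
        | some lbl =>
            if pts.contains (String.ofList rest) then
              some (lbl ++ " — " ++ pyPtLabel (String.ofList rest))
            else pvScanSplits pts (pre ++ [c]) rest
        | none => pvScanSplits pts (pre ++ [c]) rest
      else pvScanSplits pts (pre ++ [c]) rest

def reg_col_label_py_alt (col : String) (pitch_types : List String) : String :=
  match PySem.Dict.get? pvOutcomeLabels col with
  | some l => l
  | none =>
      match PySem.Dict.get? pvShortLabels col with
      | some lbl => lbl ++ " — All Pitches"
      | none =>
          match pvScanSplits pitch_types [] col.toList with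
          | some r => r
          | none => col

-- ===== PRECONDITION & SPEC =====
def Spec_reg_col_label_py (col : String) (pitch_types : List String) (out : String) : Prop := out = reg_col_label_py_alt col pitch_types
instance (col : String) (pitch_types : List String) (out : String) : Decidable (Spec_reg_col_label_py col pitch_types out) := by unfold Spec_reg_col_label_py; infer_instance

-- ===== CLAIM (what is proved, stated in full; the proofs are below) =====
def Claim_equal_reg_col_label_py : Prop := ∀ (col : String) (pitch_types : List String), Dom_reg_col_label_py col pitch_types → Spec_reg_col_label_py col pitch_types (reg_col_label_py col pitch_types)

-- ===== LEMMAS AND PROOFS =====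

-- A's loop with the raw→label lookups resolved: same traversal over short→label pairs
def pvLoopAR (col : String) (pts : List String) : List (String × String) → String
  | [] => col
  | (s, lbl) :: rest =>
      if col == s then lbl ++ " — All Pitches"
      else
        match pvScanPts col s lbl pts with
        | some r => r
        | none => pvLoopAR col pts rest

theorem pvConvert (col : String) (pts : List String) :
    pvLoopShorts col pts pvMetricShort = pvLoopAR col pts pvShortLabels.items := rfl

-- key facts about the eight short keys
theorem pvKeysNodup : pvShortLabels.keys.Nodup := by decide

theorem pvNoPre : ∀ a ∈ pvShortLabels.keys, ∀ b ∈ pvShortLabels.keys,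
    ¬ (a.toList ++ ['_'] <+: b.toList) := by decide

theorem pvToListSplit (s pt : String) : (s ++ "_" ++ pt).toList = s.toList ++ '_' :: pt.toList := by
  simp

theorem pvCancel {s p q : String} (h : s ++ "_" ++ p = s ++ "_" ++ q) : p = q := by
  have h' := congrArg String.toList h
  rw [pvToListSplit, pvToListSplit] at h'
  have := List.append_cancel_left h'
  exact String.toList_inj.mp (by simpa using this)

theorem pvKeyUnique {a b p q : String}
    (ha : a ∈ pvShortLabels.keys) (hb : b ∈ pvShortLabels.keys)
    (h : a ++ "_" ++ p = b ++ "_" ++ q) : a = b ∧ p = q := by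
  have h' := congrArg String.toList h
  rw [pvToListSplit, pvToListSplit] at h'
  have hab : a = b := by
    rcases List.append_eq_append_iff.mp h' with ⟨a', h1, h2⟩ | ⟨c', h1, h2⟩
    · cases a' with
      | nil => exact String.toList_inj.mp (by simpa using h1.symm)
      | cons x xs =>
          have hx : x = '_' := by
            have := congrArg (fun l => l.head?) h2; simpa using this.symm
          exfalso
          exact pvNoPre a ha b hb ⟨xs, by rw [h1, hx]; simp⟩
    · cases c' with
      | nil => exact String.toList_inj.mp (by simpa using h1)
      | cons x xs =>
          have hx : x = '_' := by
            have := congrArg (fun l => l.head?) h2; simpa using this.symm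
          exfalso
          exact pvNoPre b hb a ha ⟨xs, by rw [h1, hx]; simp⟩
  exact ⟨hab, pvCancel (hab ▸ h)⟩

theorem pvExactNoPt {a b p : String}
    (ha : a ∈ pvShortLabels.keys) (hb : b ∈ pvShortLabels.keys)
    (h : b = a ++ "_" ++ p) : False := by
  have h' := congrArg String.toList h
  rw [pvToListSplit] at h'
  exact pvNoPre a ha b hb ⟨p.toList, by rw [h']; simp⟩

-- values are determined by keys in a nodup-key association list
theorem pvValUnique {α β : Type} [DecidableEq α] {L : List (α × β)} (hnd : (L.map Prod.fst).Nodup)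
    {k : α} {v w : β} (hv : (k, v) ∈ L) (hw : (k, w) ∈ L) : v = w := by
  induction L with
  | nil => cases hv
  | cons hd tl ih =>
      simp only [List.map_cons, List.nodup_cons] at hnd
      obtain ⟨k', v'⟩ := hd
      rcases List.mem_cons.mp hv with hv1 | hv1 <;> rcases List.mem_cons.mp hw with hw1 | hw1
      · obtain ⟨-, rfl⟩ := (Prod.mk.injEq ..).mp hv1
        obtain ⟨-, rfl⟩ := (Prod.mk.injEq ..).mp hw1
        rfl
      · obtain ⟨rfl, -⟩ := (Prod.mk.injEq ..).mp hv1
        exact absurd (List.mem_map_of_mem (f := Prod.fst) hw1) hnd.1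
      · obtain ⟨rfl, -⟩ := (Prod.mk.injEq ..).mp hw1
        exact absurd (List.mem_map_of_mem (f := Prod.fst) hv1) hnd.1
      · exact ih hnd.2 hv1 hw1

theorem pvMemKeys {s l : String} (h : (s, l) ∈ pvShortLabels.items) : s ∈ pvShortLabels.keys :=
  PySem.Dict.mem_keys_of_mem_items _ h

-- lookup succeeds on each of the eight literal entries
theorem pvGetShort {s lbl : String} (h : (s, lbl) ∈ pvShortLabels.items) :
    PySem.Dict.get? pvShortLabels s = some lbl := by
  simp [pvShortLabels] at h
  rcases h with ⟨rfl, rfl⟩ | ⟨rfl, rfl⟩ | ⟨rfl, rfl⟩ | ⟨rfl, rfl⟩ |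
    ⟨rfl, rfl⟩ | ⟨rfl, rfl⟩ | ⟨rfl, rfl⟩ | ⟨rfl, rfl⟩ <;> decide

-- pvScanPts characterizations
theorem pvScanPts_some {col s lbl pt : String} {pts : List String}
    (hpt : pt ∈ pts) (hcol : col = s ++ "_" ++ pt) :
    pvScanPts col s lbl pts = some (lbl ++ " — " ++ pyPtLabel pt) := by
  induction pts with
  | nil => cases hpt
  | cons hd tl ih =>
      simp only [pvScanPts]
      by_cases h : col = s ++ "_" ++ hd
      · have : hd = pt := pvCancel (h.symm.trans hcol)
        simp [h, this]
      · have : pt ∈ tl := by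
          rcases List.mem_cons.mp hpt with h1 | h1
          · exact absurd (h1 ▸ hcol) h
          · exact h1
        simp [h, ih this]

theorem pvScanPts_none {col s lbl : String} {pts : List String}
    (h : ∀ pt ∈ pts, col ≠ s ++ "_" ++ pt) : pvScanPts col s lbl pts = none := by
  induction pts with
  | nil => rfl
  | cons hd tl ih =>
      simp only [pvScanPts]
      have := h hd (List.mem_cons_self ..)
      simp [this, ih (fun pt hp => h pt (List.mem_cons_of_mem _ hp))]

-- pvLoopAR characterizations
theorem pvLoopAR_exact {col : String} {pts : List String} {L : List (String × String)}
    {s lbl : String}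
    (hsub : ∀ x ∈ L, x ∈ pvShortLabels.items) (hmem : (s, lbl) ∈ L) (hcol : col = s) :
    pvLoopAR col pts L = lbl ++ " — All Pitches" := by
  induction L with
  | nil => cases hmem
  | cons hd tl ih =>
      obtain ⟨s', l'⟩ := hd
      simp only [pvLoopAR]
      by_cases h : col = s'
      · have hs : s' = s := h.symm.trans hcol
        subst hs
        have hl : l' = lbl :=
          pvValUnique pvKeysNodup (hsub _ (List.mem_cons_self ..)) (hsub _ hmem)
        simp [h, hl]
      · have hscan : pvScanPts col s' l' pts = none := by
          apply pvScanPts_none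
          intro pt _ hc
          exact pvExactNoPt (pvMemKeys (hsub _ (List.mem_cons_self ..)))
            (pvMemKeys (hsub _ hmem)) (hcol ▸ hc)
        have hmem' : (s, lbl) ∈ tl := by
          rcases List.mem_cons.mp hmem with h1 | h1
          · have hs : s = s' := congrArg Prod.fst h1
            exact absurd (hcol.trans hs) h
          · exact h1
        simp [h, hscan, ih (fun x hx => hsub x (List.mem_cons_of_mem _ hx)) hmem']

theorem pvLoopAR_grid {col : String} {pts : List String} {L : List (String × String)}
    {s lbl pt : String}
    (hsub : ∀ x ∈ L, x ∈ pvShortLabels.items) (hmem : (s, lbl) ∈ L)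
    (hpt : pt ∈ pts) (hcol : col = s ++ "_" ++ pt)
    (hnoex : ∀ x ∈ pvShortLabels.items, col ≠ x.1) :
    pvLoopAR col pts L = lbl ++ " — " ++ pyPtLabel pt := by
  induction L with
  | nil => cases hmem
  | cons hd tl ih =>
      obtain ⟨s', l'⟩ := hd
      simp only [pvLoopAR]
      have hne : ¬ col = s' := hnoex (s', l') (hsub _ (List.mem_cons_self ..))
      by_cases h : s' = s
      · subst h
        have hl : l' = lbl :=
          pvValUnique pvKeysNodup (hsub _ (List.mem_cons_self ..)) (hsub _ hmem)
        simp [hne, pvScanPts_some hpt hcol, hl]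
      · have hscan : pvScanPts col s' l' pts = none := by
          apply pvScanPts_none
          intro pt' _ hc
          exact h ((pvKeyUnique (pvMemKeys (hsub _ (List.mem_cons_self ..)))
            (pvMemKeys (hsub _ hmem)) (hc.symm.trans hcol)).1)
        have hmem' : (s, lbl) ∈ tl := by
          rcases List.mem_cons.mp hmem with h1 | h1
          · have hs : s = s' := congrArg Prod.fst h1
            exact absurd hs.symm h
          · exact h1
        simp [hne, hscan, ih (fun x hx => hsub x (List.mem_cons_of_mem _ hx)) hmem']

theorem pvLoopAR_nomatch {col : String} {pts : List String} {L : List (String × String)}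
    (hsub : ∀ x ∈ L, x ∈ pvShortLabels.items)
    (hnoex : ∀ x ∈ L, col ≠ x.1)
    (hnogrid : ∀ x ∈ L, ∀ pt ∈ pts, col ≠ x.1 ++ "_" ++ pt) :
    pvLoopAR col pts L = col := by
  induction L with
  | nil => rfl
  | cons hd tl ih =>
      obtain ⟨s', l'⟩ := hd
      simp only [pvLoopAR]
      have hscan : pvScanPts col s' l' pts = none :=
        pvScanPts_none (fun pt hp => hnogrid (s', l') (List.mem_cons_self ..) pt hp)
      simp [hnoex (s', l') (List.mem_cons_self ..), hscan,
        ih (fun x hx => hsub x (List.mem_cons_of_mem _ hx))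
          (fun x hx => hnoex x (List.mem_cons_of_mem _ hx))
          (fun x hx => hnogrid x (List.mem_cons_of_mem _ hx))]

-- pvScanSplits characterizations
theorem pvSplit_some {col s lbl p : String} {pts : List String} {rest : List Char}
    (hmem : (s, lbl) ∈ pvShortLabels.items) (hpt : p ∈ pts)
    (hcol : col.toList = s.toList ++ '_' :: p.toList) :
    ∀ pre : List Char, pre ++ rest = col.toList → pre.length ≤ s.toList.length →
      pvScanSplits pts pre rest = some (lbl ++ " — " ++ pyPtLabel p) := by
  induction rest with
  | nil =>
      intro pre hpr hlen
      exfalso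
      rw [List.append_nil] at hpr
      have h1 : pre.length = col.toList.length := by rw [hpr]
      have h2 : col.toList.length = s.toList.length + (p.toList.length + 1) := by
        rw [hcol]; simp only [List.length_append, List.length_cons]
      omega
  | cons c rest ih =>
      intro pre hpr hlen
      have h2 : pre ++ c :: rest = s.toList ++ '_' :: p.toList := hpr.trans hcol
      by_cases heq : pre.length = s.toList.length
      · obtain ⟨h3, h4⟩ := List.append_inj h2 heq
        injection h4 with hc h5
        subst h3; subst hc; subst h5
        simp [pvScanSplits, pvGetShort hmem, hpt]
      · have hlt : pre.length < s.toList.length := lt_of_le_of_ne hlen heq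
        have hpr' : (pre ++ [c]) ++ rest = col.toList := by simpa using hpr
        have hlen' : (pre ++ [c]).length ≤ s.toList.length := by
          simp only [List.length_append, List.length_singleton]; omega
        obtain ⟨a', ha1, ha2⟩ | ⟨c', hc1, _⟩ := List.append_eq_append_iff.mp h2
        · -- s.toList = pre ++ a'
          cases a' with
          | nil =>
              exfalso
              have := congrArg List.length ha1
              simp only [List.append_nil] at this
              omega
          | cons c0 a'' =>
              injection ha2 with hc0 _
              subst hc0
              simp only [pvScanSplits]
              by_cases hcu : (c == '_') = true
              · rw [if_pos hcu]
                have hnk : PySem.Dict.get? pvShortLabels (String.ofList pre) = none := by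
                  cases hg : PySem.Dict.get? pvShortLabels (String.ofList pre) with
                  | none => rfl
                  | some l' =>
                      exfalso
                      have hk : String.ofList pre ∈ pvShortLabels.keys :=
                        pvMemKeys (PySem.Dict.mem_items_of_get?_eq_some _ hg)
                      apply pvNoPre (String.ofList pre) hk s (pvMemKeys hmem)
                      refine ⟨a'', ?_⟩
                      rw [ha1, String.toList_ofList, ← eq_of_beq hcu]
                      simp
                rw [hnk]
                exact ih _ hpr' hlen'
              · rw [if_neg hcu]
                exact ih _ hpr' hlen'
        · exfalso
          have := congrArg List.length hc1
          simp only [List.length_append] at this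
          omega

theorem pvSplit_none {col : String} {pts : List String} {rest : List Char}
    (h : ∀ x ∈ pvShortLabels.items, ∀ p ∈ pts, col ≠ x.1 ++ "_" ++ p) :
    ∀ pre : List Char, pre ++ rest = col.toList → pvScanSplits pts pre rest = none := by
  induction rest with
  | nil => intro pre _; rfl
  | cons c rest ih =>
      intro pre hpr
      have hpr' : (pre ++ [c]) ++ rest = col.toList := by simpa using hpr
      simp only [pvScanSplits]
      by_cases hcu : (c == '_') = true
      · rw [if_pos hcu]
        cases hg : PySem.Dict.get? pvShortLabels (String.ofList pre) with
        | none => exact ih _ hpr'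
        | some lbl =>
            have hx := PySem.Dict.mem_items_of_get?_eq_some _ hg
            by_cases hct : pts.contains (String.ofList rest) = true
            · exfalso
              have hp : String.ofList rest ∈ pts := List.mem_of_elem_eq_true hct
              apply h _ hx _ hp
              apply String.toList_inj.mp
              rw [pvToListSplit]
              simp only [String.toList_ofList]
              rw [← hpr, ← eq_of_beq hcu]
            · rw [Bool.not_eq_true] at hct
              simp only [hct, Bool.false_eq_true, if_false]
              exact ih _ hpr'
      · rw [if_neg hcu]
        exact ih _ hpr'

-- the core equality, after the common outcome-table branch
theorem pvMain (col : String) (pts : List String) :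
    pvLoopAR col pts pvShortLabels.items =
      (match PySem.Dict.get? pvShortLabels col with
       | some lbl => lbl ++ " — All Pitches"
       | none =>
           match pvScanSplits pts [] col.toList with
           | some r => r
           | none => col) := by
  cases hg : PySem.Dict.get? pvShortLabels col with
  | some lbl =>
      have hmem : (col, lbl) ∈ pvShortLabels.items :=
        PySem.Dict.mem_items_of_get?_eq_some _ hg
      simp [pvLoopAR_exact (fun x hx => hx) hmem rfl]
  | none =>
      have hnk : col ∉ pvShortLabels.keys :=
        (PySem.Dict.get?_eq_none_iff_not_mem_keys _ _).mp hg
      have hnoex : ∀ x ∈ pvShortLabels.items, col ≠ x.1 := by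
        rintro ⟨s, l⟩ hx hc
        exact hnk (by rw [hc]; exact pvMemKeys hx)
      by_cases hgrid : ∃ x ∈ pvShortLabels.items, ∃ pt ∈ pts, col = x.1 ++ "_" ++ pt
      · obtain ⟨⟨s, lbl⟩, hx, pt, hpt, hc⟩ := hgrid
        have hcol : col.toList = s.toList ++ '_' :: pt.toList := by
          rw [hc]; exact pvToListSplit s pt
        have hB := pvSplit_some hx hpt hcol [] (List.nil_append _) (Nat.zero_le _)
        simp [hB, pvLoopAR_grid (fun x hx => hx) hx hpt hc hnoex]
      · push Not at hgrid
        have hB := pvSplit_none hgrid [] (List.nil_append _)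
        simp [hB, pvLoopAR_nomatch (fun x hx => hx) hnoex hgrid]

-- ===== VERDICT (by name: the statement is the Claim_ definition above) =====
theorem reg_col_label_py_spec : Claim_equal_reg_col_label_py := by
  intro col pts _
  unfold Spec_reg_col_label_py reg_col_label_py reg_col_label_py_alt
  cases ho : PySem.Dict.get? pvOutcomeLabels col with
  | some l => rfl
  | none => simpa using (pvConvert col pts).trans (pvMain col pts)
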